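-- pv_equiv track=rewrite | github.com/qianlima-lab/SpanDLA | utils.py | combinetag2spantag
-- ===== SOURCE A (Python) =====
-- def combinetag2spantag(inputs):
--     outputs = []
--     for input in inputs:
--         output = []
--         old_tag = 99
--         cur = 0
--         for i, x in enumerate(input):
--             if x > 0:
--                 output.append([cur, i, old_tag, x])
--                 old_tag = x
--                 cur = i + 1
--         outputs.append(output)
--     return outputs
-- ===== SOURCE B (Python) =====
-- def combinetag2spantag(inputs):
--     outputs = []
--     for inp in inputs:
--         rev = []
--         pending = None  # nearest positive position to the right of i
--         for i in range(len(inp) - 1, -1, -1):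
--             x = inp[i]
--             if x > 0:
--                 if pending is not None:
--                     rev.append([i + 1, pending, x, inp[pending]])
--                 pending = i
--         if pending is not None:
--             rev.append([0, pending, 99, inp[pending]])
--         rev.reverse()
--         outputs.append(rev)
--     return outputs
-- ===== Notes on version B (the rewrite author's own statement) =====
-- stated objective: alternative
-- what changed: Replaces A's left-to-right scan carrying (old_tag, cur) state with a right-to-left scan that carries only the pending boundary to the right, emits each span when its left neighbour is discovered, builds the output back-to-front and reverses it once at the end.
import Mathlib
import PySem

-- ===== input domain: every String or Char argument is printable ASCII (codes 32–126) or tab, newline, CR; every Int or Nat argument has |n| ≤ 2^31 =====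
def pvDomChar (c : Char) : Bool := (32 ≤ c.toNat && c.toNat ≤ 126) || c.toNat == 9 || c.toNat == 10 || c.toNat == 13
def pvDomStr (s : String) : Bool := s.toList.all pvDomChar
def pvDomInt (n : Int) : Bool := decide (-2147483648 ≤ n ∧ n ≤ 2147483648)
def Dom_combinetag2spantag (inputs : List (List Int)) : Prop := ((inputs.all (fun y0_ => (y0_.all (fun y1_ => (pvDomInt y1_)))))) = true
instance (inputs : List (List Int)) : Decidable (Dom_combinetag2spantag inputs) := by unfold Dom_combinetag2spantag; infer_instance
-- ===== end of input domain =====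

-- B scans right-to-left carrying only the pending right boundary, emitting spans
-- back-to-front and reversing once (alternative decomposition, same cost); return values proved equal.


-- ===== PORT A =====
-- inner loop of A: fold over enumerate(input) with state (output, old_tag, cur)
def pvStepA (st : List (List Int) × Int × Int) (ix : Int × Int) : List (List Int) × Int × Int :=
  if ix.2 > 0 then (st.1 ++ [[st.2.2, ix.1, st.2.1, ix.2]], ix.2, ix.1 + 1) else st

def combinetag2spantag (inputs : List (List Int)) : List (List (List Int)) :=
  inputs.map (fun inp => ((PySem.List.enumerate inp 0).foldl pvStepA ([], 99, 0)).1)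

-- ===== PORT B =====
-- inner loop of B: fold over range(len(inp)-1, -1, -1) with state (rev, pending);
-- inp[i] / inp[pending] are always in range, so pyGetD's default is never used
def pvStepB (inp : List Int) (st : List (List Int) × Option Int) (i : Int) : List (List Int) × Option Int :=
  let x := PySem.List.pyGetD inp i 0
  if x > 0 then
    match st.2 with
    | none => (st.1, some i)
    | some p => (st.1 ++ [[i + 1, p, x, PySem.List.pyGetD inp p 0]], some i)
  else st

def combinetag2spantag_alt (inputs : List (List Int)) : List (List (List Int)) :=
  inputs.map (fun inp =>
    let st := (PySem.List.pyRange ((inp.length : Int) - 1) (-1) (-1)).foldl (pvStepB inp) ([], none)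
    let rev := match st.2 with
      | none => st.1
      | some p => st.1 ++ [[0, p, 99, PySem.List.pyGetD inp p 0]]
    rev.reverse)

-- ===== PRECONDITION & SPEC =====
def Spec_combinetag2spantag (inputs : List (List Int)) (out : List (List (List Int))) : Prop := out = combinetag2spantag_alt inputs
instance (inputs : List (List Int)) (out : List (List (List Int))) : Decidable (Spec_combinetag2spantag inputs out) := by unfold Spec_combinetag2spantag; infer_instance

-- ===== CLAIM (what is proved, stated in full; the proofs are below) =====
def Claim_equal_combinetag2spantag : Prop := ∀ (inputs : List (List Int)), Dom_combinetag2spantag inputs → Spec_combinetag2spantag inputs (combinetag2spantag inputs)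

-- ===== LEMMAS AND PROOFS =====

-- reference recursive form of A's inner loop
def pvGo (i ot cur : Int) : List Int → List (List Int)
  | [] => []
  | x :: xs => if x > 0 then [cur, i, ot, x] :: pvGo (i+1) x (i+1) xs else pvGo (i+1) ot cur xs

theorem pvFoldA_acc (l : List (Int × Int)) : ∀ (acc : List (List Int)) (ot cur : Int),
    (l.foldl pvStepA (acc, ot, cur)).1 = acc ++ (l.foldl pvStepA ([], ot, cur)).1 := by
  induction l with
  | nil => simp
  | cons p l ih =>
    intro acc ot cur
    simp only [List.foldl_cons, pvStepA]
    by_cases h : p.2 > 0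
    · simp only [h, if_pos]
      rw [ih, ih ([] ++ [[cur, p.1, ot, p.2]])]
      simp
    · simp only [h, if_neg, not_false_iff]
      exact ih acc ot cur

theorem pvFoldA_spec (xs : List Int) : ∀ (i ot cur : Int),
    ((PySem.List.enumerate xs i).foldl pvStepA ([], ot, cur)).1 = pvGo i ot cur xs := by
  induction xs with
  | nil => intro i ot cur; simp [PySem.List.enumerate_nil, pvGo]
  | cons x xs ih =>
    intro i ot cur
    simp only [PySem.List.enumerate_cons, List.foldl_cons, pvGo, pvStepA]
    by_cases h : x > 0
    · simp only [h, if_pos]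
      rw [pvFoldA_acc, ih]
      simp
    · simp only [h, if_neg, not_false_iff]
      exact ih (i+1) ot cur

-- B's descending fold, read as a foldr over the ascending index range
def pvFoldrB (inp : List Int) (n0 : Int) : List (List Int) × Option Int :=
  (PySem.List.pyRange n0 (inp.length : Int) 1).foldr (fun i s => pvStepB inp s i) ([], none)

theorem pvB_inv (inp : List Int) : ∀ (xs : List Int) (n0 : Nat), inp.drop n0 = xs →
    ((pvFoldrB inp n0).2 = none → (pvFoldrB inp n0).1 = []) ∧
    ∀ ot s : Int, pvGo (n0 : Int) ot s xs =
      match (pvFoldrB inp n0).2 with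
      | none => []
      | some p => ([s, p, ot, PySem.List.pyGetD inp p 0]) :: (pvFoldrB inp n0).1.reverse := by
  intro xs
  induction xs with
  | nil =>
    intro n0 hdrop
    have hle : inp.length ≤ n0 := List.drop_eq_nil_iff.mp hdrop
    have : PySem.List.pyRange (n0 : Int) (inp.length : Int) 1 = [] :=
      PySem.List.pyRange_one_eq_nil (by exact_mod_cast hle)
    simp [pvFoldrB, this, pvGo]
  | cons x xs ih =>
    intro n0 hdrop
    have hlt : n0 < inp.length := by
      by_contra h
      rw [List.drop_eq_nil_iff.mpr (by omega)] at hdrop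
      exact List.cons_ne_nil x xs hdrop.symm
    have hget : inp[n0]? = some x := by
      have h0 : (inp.drop n0)[0]? = some x := by rw [hdrop]; rfl
      simpa using h0
    have hx : PySem.List.pyGetD inp (n0 : Int) 0 = x := by
      rw [PySem.List.pyGetD_natCast]
      simp [List.getD, hget]
    have hdrop' : inp.drop (n0 + 1) = xs := by
      rw [← List.tail_drop, hdrop]; rfl
    have hcons : PySem.List.pyRange (n0 : Int) (inp.length : Int) 1
        = (n0 : Int) :: PySem.List.pyRange ((n0 : Int) + 1) (inp.length : Int) 1 :=
      PySem.List.pyRange_one_cons (by exact_mod_cast hlt)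
    have hcast : ((n0 : Int) + 1) = ((n0 + 1 : Nat) : Int) := by push_cast; ring
    have hrec : pvFoldrB inp (n0 : Int) = pvStepB inp (pvFoldrB inp ((n0 + 1 : Nat) : Int)) (n0 : Int) := by
      simp only [pvFoldrB, hcons, List.foldr_cons, hcast]
    obtain ⟨ih1, ih2⟩ := ih (n0 + 1) hdrop'
    by_cases h : x > 0
    · rw [hrec]
      simp only [pvStepB, hx, h, if_pos]
      cases hp : (pvFoldrB inp ((n0 + 1 : Nat) : Int)).2 with
      | none =>
        have hnil := ih1 hp
        constructor
        · intro hc; simp at hc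
        · intro ot s
          simp only [pvGo, h, if_pos, hcast]
          rw [ih2 x ((n0 + 1 : Nat) : Int)]
          rw [← hcast] at hp hnil
          simp [hp, hnil, hget]
      | some p =>
        constructor
        · intro hc; simp at hc
        · intro ot s
          simp only [pvGo, h, if_pos, hcast]
          rw [ih2 x ((n0 + 1 : Nat) : Int)]
          rw [← hcast] at hp
          simp [hp, hget]
    · have hrec' : pvFoldrB inp (n0 : Int) = pvFoldrB inp ((n0 + 1 : Nat) : Int) := by
        rw [hrec]; simp only [pvStepB, hx, h, if_neg, not_false_iff]
      constructor
      · intro hc; rw [hrec'] at hc ⊢; exact ih1 hc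
      · intro ot s
        simp only [pvGo, h, if_neg, not_false_iff, hrec']
        rw [hcast]
        exact ih2 ot s

theorem pvInner_eq (inp : List Int) :
    (let st := (PySem.List.pyRange ((inp.length : Int) - 1) (-1) (-1)).foldl (pvStepB inp) ([], none)
     let rev := match st.2 with
       | none => st.1
       | some p => st.1 ++ [[0, p, 99, PySem.List.pyGetD inp p 0]]
     rev.reverse)
      = ((PySem.List.enumerate inp 0).foldl pvStepA ([], 99, 0)).1 := by
  rw [pvFoldA_spec inp 0 99 0]
  have hrev : PySem.List.pyRange ((inp.length : Int) - 1) (-1) (-1)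
      = (PySem.List.pyRange 0 (inp.length : Int) 1).reverse := by
    rw [PySem.List.pyRange_neg_one_eq_reverse]
    norm_num
  have hfold : (PySem.List.pyRange ((inp.length : Int) - 1) (-1) (-1)).foldl (pvStepB inp) ([], none)
      = pvFoldrB inp 0 := by
    rw [hrev, List.foldl_reverse, pvFoldrB]
  obtain ⟨h1, h2⟩ := pvB_inv inp inp 0 (by simp)
  have h20 := h2 99 0
  simp only [Nat.cast_zero] at h1 h20 hfold
  simp only [hfold]
  cases hp : (pvFoldrB inp 0).2 with
  | none => simp [hp, h1 hp] at h20 ⊢; exact h20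
  | some p => simp [hp] at h20 ⊢; exact h20.symm

-- ===== VERDICT (by name: the statement is the Claim_ definition above) =====
theorem combinetag2spantag_spec : Claim_equal_combinetag2spantag := by
  intro inputs _
  unfold Spec_combinetag2spantag combinetag2spantag combinetag2spantag_alt
  refine List.map_congr_left ?_
  intro inp _
  exact (pvInner_eq inp).symm
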